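-- pv_equiv track=rewrite | github.com/cirosantilli/project-euler-solutions | solvers/562.py | boundary_points_near_circle
-- ===== SOURCE A (Python) =====
-- from typing import List, Tuple
--
-- def boundary_points_near_circle(
--     r: int, deficit_limit: int
-- ) -> Tuple[List[int], List[int]]:
--     """
--     Produce lists xs, ys of points (x(y), y) on the right boundary of the disk
--     with deficit <= deficit_limit.
--
--     Uses a two-pointer walk: x only decreases as y increases, so total work is O(r).
--     """
--     r2 = r * r
--     x = r
--     x2 = x * x
--     y2 = 0
--
--     xs: List[int] = []
--     ys: List[int] = []
--
--     for y in range(r + 1):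
--         while x2 + y2 > r2:
--             x -= 1
--             x2 = x * x
--
--         deficit = r2 - x2 - y2
--         if deficit <= deficit_limit:
--             xs.append(x)
--             ys.append(y)
--
--         # (y+1)^2 = y^2 + 2y + 1
--         y2 += 2 * y + 1
--
--     return xs, ys
-- ===== SOURCE B (Python) =====
-- import math
-- from typing import List, Tuple
--
-- def boundary_points_near_circle(
--     r: int, deficit_limit: int
-- ) -> Tuple[List[int], List[int]]:
--     r2 = r * r
--     xs: List[int] = []
--     ys: List[int] = []
--     for y in range(r + 1):
--         y2 = y * y
--         x = math.isqrt(r2 - y2)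
--         deficit = r2 - x * x - y2
--         if deficit <= deficit_limit:
--             xs.append(x)
--             ys.append(y)
--     return xs, ys
-- ===== Notes on version B (the rewrite author's own statement) =====
-- stated objective: idiomatic
-- what changed: Replaces the shared mutable two-pointer walk (x decremented across iterations with incrementally maintained x2 and y2) by an independent per-row computation x = math.isqrt(r*r - y*y) inside a single stateless loop.
import Mathlib
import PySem

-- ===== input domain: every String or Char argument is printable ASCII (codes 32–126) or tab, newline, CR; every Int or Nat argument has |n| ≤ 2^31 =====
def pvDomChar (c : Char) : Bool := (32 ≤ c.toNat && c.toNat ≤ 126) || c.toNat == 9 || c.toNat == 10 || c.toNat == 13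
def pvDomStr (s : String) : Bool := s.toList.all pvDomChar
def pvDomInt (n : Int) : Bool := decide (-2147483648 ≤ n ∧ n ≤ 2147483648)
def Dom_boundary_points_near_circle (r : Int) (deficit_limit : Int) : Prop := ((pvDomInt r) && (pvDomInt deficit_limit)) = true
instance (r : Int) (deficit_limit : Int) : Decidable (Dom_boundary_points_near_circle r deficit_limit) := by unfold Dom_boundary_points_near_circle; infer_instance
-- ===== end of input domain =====

-- B recomputes x per row via math.isqrt instead of A's shared mutable two-pointer walk (idiomatic; same O(r) cost).

-- ===== PORT A =====
-- the inner `while x2 + y2 > r2` loop; fuel (x+1).toNat always suffices on reachable states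
def pvWhileA (fuel : Nat) (x x2 y2 r2 : Int) : Int × Int :=
  match fuel with
  | 0 => (x, x2)
  | n + 1 =>
    if x2 + y2 > r2 then pvWhileA n (x - 1) ((x - 1) * (x - 1)) y2 r2
    else (x, x2)

def pvStepA (r2 dl : Int) (st : Int × Int × Int × List Int × List Int) (y : Int) :
    Int × Int × Int × List Int × List Int :=
  match st with
  | (x, x2, y2, xs, ys) =>
    let p := pvWhileA (x + 1).toNat x x2 y2 r2
    let deficit := r2 - p.2 - y2
    if deficit ≤ dl then (p.1, p.2, y2 + 2 * y + 1, xs ++ [p.1], ys ++ [y])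
    else (p.1, p.2, y2 + 2 * y + 1, xs, ys)

def boundary_points_near_circle (r : Int) (deficit_limit : Int) : List Int × List Int :=
  let r2 := r * r
  let st := (PySem.List.pyRange 0 (r + 1) 1).foldl (pvStepA r2 deficit_limit)
    (r, r * r, 0, ([] : List Int), ([] : List Int))
  (st.2.2.2.1, st.2.2.2.2)

-- ===== PORT B =====
def pvStepB (r2 dl : Int) (acc : List Int × List Int) (y : Int) : List Int × List Int :=
  let y2 := y * y
  let x : Int := (Nat.sqrt (r2 - y2).toNat : Int)   -- math.isqrt
  let deficit := r2 - x * x - y2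
  if deficit ≤ dl then (acc.1 ++ [x], acc.2 ++ [y]) else acc

def boundary_points_near_circle_alt (r : Int) (deficit_limit : Int) : List Int × List Int :=
  let r2 := r * r
  (PySem.List.pyRange 0 (r + 1) 1).foldl (pvStepB r2 deficit_limit) ([], [])

-- ===== PRECONDITION & SPEC =====
def Spec_boundary_points_near_circle (r : Int) (deficit_limit : Int) (out : List Int × List Int) : Prop := out = boundary_points_near_circle_alt r deficit_limit
instance (r : Int) (deficit_limit : Int) (out : List Int × List Int) : Decidable (Spec_boundary_points_near_circle r deficit_limit out) := by unfold Spec_boundary_points_near_circle; infer_instance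

-- ===== CLAIM (what is proved, stated in full; the proofs are below) =====
def Claim_equal_boundary_points_near_circle : Prop := ∀ (r : Int) (deficit_limit : Int), Dom_boundary_points_near_circle r deficit_limit → Spec_boundary_points_near_circle r deficit_limit (boundary_points_near_circle r deficit_limit)

-- ===== LEMMAS AND PROOFS =====

-- integer square root of a (nonnegative) Int, as B computes it
def pvS (m : Int) : Int := (Nat.sqrt m.toNat : Int)

lemma pvS_nonneg (m : Int) : 0 ≤ pvS m := Int.natCast_nonneg _

lemma pvS_sq_le (m : Int) (hm : 0 ≤ m) : pvS m * pvS m ≤ m := by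
  have h : Nat.sqrt m.toNat * Nat.sqrt m.toNat ≤ m.toNat := Nat.sqrt_le m.toNat
  have : ((Nat.sqrt m.toNat * Nat.sqrt m.toNat : Nat) : Int) ≤ (m.toNat : Int) := by
    exact_mod_cast h
  simpa [pvS, Int.toNat_of_nonneg hm] using this

lemma pvS_lt_succ_sq (m : Int) : m < (pvS m + 1) * (pvS m + 1) := by
  have h : m.toNat < (Nat.sqrt m.toNat + 1) * (Nat.sqrt m.toNat + 1) := Nat.lt_succ_sqrt m.toNat
  have h' : ((m.toNat : Int)) < (((Nat.sqrt m.toNat + 1) * (Nat.sqrt m.toNat + 1) : Nat) : Int) := by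
    exact_mod_cast h
  calc m ≤ (m.toNat : Int) := Int.self_le_toNat m
    _ < _ := h'
    _ = (pvS m + 1) * (pvS m + 1) := by push_cast [pvS]; ring

lemma pvS_mono {a b : Int} (h : a ≤ b) : pvS a ≤ pvS b := by
  have h2 : a.toNat ≤ b.toNat := Int.toNat_le_toNat h
  unfold pvS
  exact_mod_cast Nat.sqrt_le_sqrt h2

lemma pvS_sq (r : Int) (hr : 0 ≤ r) : pvS (r * r) = r := by
  have h1 : (r * r).toNat = r.toNat * r.toNat := by
    rw [Int.toNat_mul hr hr]
  simp [pvS, h1, Int.toNat_of_nonneg hr]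

-- the while loop computes the integer square root of m := r2 - y2
lemma pvWhileA_eq (y2 r2 : Int) (hm : 0 ≤ r2 - y2) :
    ∀ (fuel : Nat) (x : Int), pvS (r2 - y2) ≤ x → (x - pvS (r2 - y2)).toNat < fuel →
      pvWhileA fuel x (x * x) y2 r2 = (pvS (r2 - y2), pvS (r2 - y2) * pvS (r2 - y2)) := by
  intro fuel
  induction fuel with
  | zero => intro x _ h; omega
  | succ n ih =>
    intro x hsx hfuel
    set s := pvS (r2 - y2) with hs
    by_cases hc : x * x + y2 > r2
    · have hxm : r2 - y2 < x * x := by omega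
      have hxs : s < x := by
        by_contra hle
        have : x = s := le_antisymm (not_lt.mp hle) hsx
        subst this
        have h2 := pvS_sq_le (r2 - y2) hm
        rw [← hs] at h2
        omega
      have h1 : s ≤ x - 1 := by omega
      have h2 : (x - 1 - s).toNat < n := by omega
      have := ih (x - 1) h1 h2
      simp only [pvWhileA, if_pos hc]
      exact this
    · have hxm : x * x ≤ r2 - y2 := by omega
      have hxle : x ≤ s := by
        by_contra hgt
        have hx1 : s + 1 ≤ x := by omega
        have hpos : 0 ≤ s + 1 := by have := pvS_nonneg (r2 - y2); omega
        have : (s + 1) * (s + 1) ≤ x * x := mul_le_mul hx1 hx1 hpos (by omega)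
        have h3 := pvS_lt_succ_sq (r2 - y2)
        rw [← hs] at h3
        omega
      have hx : x = s := le_antisymm hxle hsx
      simp only [pvWhileA, if_neg hc]
      rw [hx]

-- the main invariant: after folding y = 0 .. n-1, A's state is (s(n-1), s(n-1)², n², B's lists)
lemma pvInv (r dl : Int) (hr : 0 ≤ r) :
    ∀ n : Nat, 1 ≤ n → (n : Int) ≤ r + 1 →
      (List.foldl (pvStepA (r * r) dl) (r, r * r, 0, ([] : List Int), ([] : List Int))
        (PySem.List.pyRange 0 (n : Int) 1))
      = (pvS (r * r - ((n : Int) - 1) * ((n : Int) - 1)),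
         pvS (r * r - ((n : Int) - 1) * ((n : Int) - 1)) * pvS (r * r - ((n : Int) - 1) * ((n : Int) - 1)),
         (n : Int) * (n : Int),
         (List.foldl (pvStepB (r * r) dl) ([], []) (PySem.List.pyRange 0 (n : Int) 1)).1,
         (List.foldl (pvStepB (r * r) dl) ([], []) (PySem.List.pyRange 0 (n : Int) 1)).2) := by
  intro n
  induction n with
  | zero => intro h; omega
  | succ n ih =>
    intro _ hle
    have hcast : ((n + 1 : Nat) : Int) = (n : Int) + 1 := by push_cast; ring
    by_cases hn : n = 0
    · -- base case: the first iteration, y = 0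
      subst hn
      have hsq : ∀ t : Int, t = r * r → pvS t = r := by
        intro t ht; rw [ht, pvS_sq r hr]
      have hm : (0:Int) ≤ r * r - 0 := by nlinarith
      have hw := pvWhileA_eq (0 : Int) (r * r) hm ((r + 1).toNat) r
        (by rw [hsq _ (by ring)]) (by rw [hsq _ (by ring)]; omega)
      have e0 : pvS (r * r - 0) = r := hsq _ (by ring)
      have hx : ((Nat.sqrt (r * r - (0:Int) * 0).toNat : Nat) : Int) = r := by
        have h := hsq (r * r - (0:Int) * 0) (by ring)
        simpa [pvS] using h
      have e2 : pvS (r * r - ((0:Int) + 1 - 1) * ((0:Int) + 1 - 1)) = r := hsq _ (by ring)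
      rw [hcast]
      simp only [Nat.cast_zero, PySem.List.pyRange_one_singleton, List.foldl_cons,
        List.foldl_nil, pvStepA, pvStepB, hw, e0, hx, e2]
      split_ifs with h1 h2 h2 <;>
        first
        | (exfalso; omega)
        | (simp only [Prod.mk.injEq, and_true, true_and]; ring)
    · -- inductive step: append iteration y = n
      have hn1 : 1 ≤ n := Nat.one_le_iff_ne_zero.mpr hn
      have hle' : (n : Int) ≤ r + 1 := by omega
      have hnr : (n : Int) ≤ r := by omega
      have IH := ih hn1 hle'
      rw [hcast, PySem.List.pyRange_one_succ_right (by positivity : (0:Int) ≤ (n:Int))]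
      simp only [List.foldl_append, List.foldl_cons, List.foldl_nil]
      rw [IH]
      set s1 := pvS (r * r - ((n:Int) - 1) * ((n:Int) - 1)) with hs1
      set s2 := pvS (r * r - (n:Int) * (n:Int)) with hs2
      have hm2 : (0:Int) ≤ r * r - (n:Int) * (n:Int) := by
        have h0 : (0:Int) ≤ (n:Int) := Int.natCast_nonneg n
        nlinarith
      have hmono : s2 ≤ s1 := by
        apply pvS_mono
        have h1 : (1:Int) ≤ (n:Int) := by exact_mod_cast hn1
        nlinarith
      have hs1n : 0 ≤ s1 := pvS_nonneg _
      have hs2n : 0 ≤ s2 := pvS_nonneg _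
      have hw := pvWhileA_eq ((n:Int) * (n:Int)) (r * r) hm2 ((s1 + 1).toNat) s1
        (by rw [← hs2]; exact hmono)
        (by rw [← hs2]; omega)
      have hidx : pvS (r * r - ((n:Int) + 1 - 1) * ((n:Int) + 1 - 1)) = s2 := by
        rw [hs2, show ((n:Int)) + 1 - 1 = (n:Int) by ring]
      have hx : ((Nat.sqrt (r * r - (n:Int) * (n:Int)).toNat : Nat) : Int) = s2 := by
        rw [hs2]; rfl
      simp only [pvStepA, pvStepB, hw, hidx, hx]
      rw [← hs2]
      split_ifs with h1 <;>
        (simp only [Prod.mk.injEq, and_true, true_and]; ring)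

-- ===== VERDICT (by name: the statement is the Claim_ definition above) =====
theorem boundary_points_near_circle_spec : Claim_equal_boundary_points_near_circle := by
  unfold Claim_equal_boundary_points_near_circle
  intro r dl _
  unfold Spec_boundary_points_near_circle
  simp only [boundary_points_near_circle, boundary_points_near_circle_alt]
  by_cases hr : r + 1 ≤ 0
  · rw [PySem.List.pyRange_one_eq_nil (by omega : r + 1 ≤ (0:Int))]
    rfl
  · have hr0 : 0 ≤ r := by omega
    have h1 : 1 ≤ (r + 1).toNat := by omega
    have h2 : (((r + 1).toNat : Nat) : Int) ≤ r + 1 := by omega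
    have hi := pvInv r dl hr0 (r + 1).toNat h1 h2
    rw [show (((r + 1).toNat : Nat) : Int) = r + 1 by omega] at hi
    rw [hi]
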